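-- pv_equiv track=rewrite | github.com/nitin22032002/leetcode_question | Seating Arrangement - GFG/seating-arrangement.py | is_possible_to_get_seats
-- ===== SOURCE A (Python) =====
-- from typing import List
--
-- def is_possible_to_get_seats(n : int, m : int, seats : List[int]) -> bool:
--     i=0
--     r=0
--     while(i<m):
--         j=i
--         while(i<m and seats[i]==0):
--             i+=1
--         count=(i-j)
--         if(count!=0):
--             if(i<m):
--                 count-=1
--             if(j!=0):
--                 count-=1
--             r+=(count+1)//2
--         while(i<m and seats[i]==1):i+=1
--     return r>=n
-- ===== SOURCE B (Python) =====
-- from typing import List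
--
-- def is_possible_to_get_seats(n: int, m: int, seats: List[int]) -> bool:
--     ones = [i for i in range(m) if seats[i] == 1]
--     if m <= 0:
--         return 0 >= n
--     if not ones:
--         return (m + 1) // 2 >= n
--     free = ones[0] // 2 + (m - 1 - ones[-1]) // 2
--     for p, q in zip(ones, ones[1:]):
--         free += max(0, (q - p - 2) // 2)
--     return free >= n
-- ===== Notes on version B (the rewrite author's own statement) =====
-- stated objective: alternative
-- what changed: Replaces A's nested while-loops over seat indices by first collecting the list of occupied positions and summing a closed-form capacity for each zero gap (leading, interior, trailing).
import Mathlib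
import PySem

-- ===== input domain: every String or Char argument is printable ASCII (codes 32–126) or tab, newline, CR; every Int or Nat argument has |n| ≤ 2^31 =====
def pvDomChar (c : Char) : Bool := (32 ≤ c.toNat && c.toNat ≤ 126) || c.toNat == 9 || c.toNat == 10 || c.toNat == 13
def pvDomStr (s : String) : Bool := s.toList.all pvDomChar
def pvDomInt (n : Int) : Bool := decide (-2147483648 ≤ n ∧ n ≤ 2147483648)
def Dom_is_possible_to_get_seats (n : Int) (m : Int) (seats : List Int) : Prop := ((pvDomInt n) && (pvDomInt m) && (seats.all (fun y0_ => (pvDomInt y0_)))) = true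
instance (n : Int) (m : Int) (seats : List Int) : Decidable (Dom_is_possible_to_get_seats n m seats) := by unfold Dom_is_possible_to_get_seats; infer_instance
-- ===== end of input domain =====

-- B re-implements A's run-scanning while-loops as a sum of closed-form gap capacities over
-- the list of occupied positions; same O(m) cost, different decomposition ("alternative").

-- ===== PORT A =====
-- inner 'while i<m and seats[i]==v: i+=1' of A (v = 0 and v = 1); genuinely terminating
def pvSkipEq (v : Int) (m : Int) (seats : List Int) (i : Int) : Int :=
  if h : i < m ∧ PySem.List.pyGet? seats i = some v then pvSkipEq v m seats (i + 1) else i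
termination_by (m - i).toNat
decreasing_by omega

-- outer 'while i<m' of A; fuel only for totality off the precondition (Python A loops forever
-- there); inside Pre_ the index strictly increases each iteration, so m.toNat+1 steps suffice
def pvLoopA (m : Int) (seats : List Int) : Nat → Int → Int → Int
  | 0, _, r => r
  | Nat.succ fuel, i, r =>
    if i < m then
      let j := i
      let i1 := pvSkipEq 0 m seats i
      let count := i1 - j
      let r' := if count ≠ 0 then
          let c1 := if i1 < m then count - 1 else count
          let c2 := if j ≠ 0 then c1 - 1 else c1
          r + PySem.Int.floordiv (c2 + 1) 2
        else r
      pvLoopA m seats fuel (pvSkipEq 1 m seats i1) r'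
    else r

def is_possible_to_get_seats (n : Int) (m : Int) (seats : List Int) : Bool :=
  decide (pvLoopA m seats (m.toNat + 1) 0 0 ≥ n)

-- ===== PORT B =====
def is_possible_to_get_seats_alt (n : Int) (m : Int) (seats : List Int) : Bool :=
  let ones := (PySem.List.pyRange 0 m 1).filter
      (fun i => decide (PySem.List.pyGet? seats i = some 1))
  if m ≤ 0 then decide ((0 : Int) ≥ n)
  else
    match ones with
    | [] => decide (PySem.Int.floordiv (m + 1) 2 ≥ n)
    | o :: rest =>
      let last := (o :: rest).getLast (by simp)
      let free0 := PySem.Int.floordiv o 2 + PySem.Int.floordiv (m - 1 - last) 2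
      let free := (List.zip (o :: rest) rest).foldl
          (fun acc pq => acc + max 0 (PySem.Int.floordiv (pq.2 - pq.1 - 2) 2)) free0
      decide (free ≥ n)

-- ===== PRECONDITION & SPEC =====
-- Pre_: Python A raises IndexError when m exceeds len(seats), and loops forever when some
-- scanned seat is neither 0 nor 1; both are excluded (A returns on everything else).
def Pre_is_possible_to_get_seats (n : Int) (m : Int) (seats : List Int) : Prop :=
  m ≤ (seats.length : Int) ∧ ∀ x ∈ seats.take m.toNat, x = 0 ∨ x = 1
instance (n : Int) (m : Int) (seats : List Int) : Decidable (Pre_is_possible_to_get_seats n m seats) := by unfold Pre_is_possible_to_get_seats; infer_instance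

def pvWitness_is_possible_to_get_seats : Int × Int × List Int := (1, 4, [0, 1, 0, 0])

def Spec_is_possible_to_get_seats (n : Int) (m : Int) (seats : List Int) (out : Bool) : Prop := out = is_possible_to_get_seats_alt n m seats
instance (n : Int) (m : Int) (seats : List Int) (out : Bool) : Decidable (Spec_is_possible_to_get_seats n m seats out) := by unfold Spec_is_possible_to_get_seats; infer_instance

-- ===== CLAIM (what is proved, stated in full; the proofs are below) =====
def Claim_equal_is_possible_to_get_seats : Prop := ∀ (n : Int) (m : Int) (seats : List Int), Dom_is_possible_to_get_seats n m seats → Pre_is_possible_to_get_seats n m seats → Spec_is_possible_to_get_seats n m seats (is_possible_to_get_seats n m seats)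

-- ===== LEMMAS AND PROOFS =====

-- B's 'ones' list and the occupied positions from index i onwards
def pvOnes (m : Int) (seats : List Int) : List Int :=
  (PySem.List.pyRange 0 m 1).filter (fun i => decide (PySem.List.pyGet? seats i = some 1))

def pvOnesFrom (m : Int) (seats : List Int) (i : Int) : List Int :=
  (pvOnes m seats).filter (fun q => decide (i ≤ q))

-- pvBfrom m p l = gap capacities after previous occupied position p, remaining ones l
def pvBfrom (m : Int) (p : Int) : List Int → Int
  | [] => PySem.Int.floordiv (m - 1 - p) 2
  | q :: tl => max 0 (PySem.Int.floordiv (q - p - 2) 2) + pvBfrom m q tl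

lemma pv_bin (m : Int) (seats : List Int)
    (hlen : m ≤ (seats.length : Int))
    (hb : ∀ x ∈ seats.take m.toNat, x = 0 ∨ x = 1) :
    ∀ k : Int, 0 ≤ k → k < m →
      PySem.List.pyGet? seats k = some 0 ∨ PySem.List.pyGet? seats k = some 1 := by
  intro k hk0 hkm
  have hkl : k.toNat < seats.length := by omega
  have hget : PySem.List.pyGet? seats k = some (seats[k.toNat]) :=
    PySem.List.pyGet?_eq_some_getElem seats hk0 (by omega)
  have hlt : k.toNat < (seats.take m.toNat).length := by
    simp only [List.length_take]; omega
  have heq : (seats.take m.toNat)[k.toNat] = seats[k.toNat] := List.getElem_take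
  have hmem : seats[k.toNat] ∈ seats.take m.toNat := heq ▸ List.getElem_mem hlt
  rcases hb _ hmem with h | h
  · left; rw [hget, h]
  · right; rw [hget, h]

lemma pv_mem_ones (m : Int) (seats : List Int) (q : Int) :
    q ∈ pvOnes m seats ↔ 0 ≤ q ∧ q < m ∧ PySem.List.pyGet? seats q = some 1 := by
  simp [pvOnes, List.mem_filter, PySem.List.mem_pyRange_one, and_assoc]

lemma pv_pairwise_ones (m : Int) (seats : List Int) :
    (pvOnes m seats).Pairwise (· < ·) :=
  List.Pairwise.filter _ (PySem.List.pairwise_lt_pyRange_one 0 m)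

lemma pv_mem_onesFrom (m : Int) (seats : List Int) (i q : Int) :
    q ∈ pvOnesFrom m seats i ↔
      i ≤ q ∧ 0 ≤ q ∧ q < m ∧ PySem.List.pyGet? seats q = some 1 := by
  simp only [pvOnesFrom, List.mem_filter, pv_mem_ones, decide_eq_true_eq]
  tauto

lemma pv_onesFrom_zero (m : Int) (seats : List Int) :
    pvOnesFrom m seats 0 = pvOnes m seats := by
  unfold pvOnesFrom
  refine List.filter_eq_self.mpr ?_
  intro x hx
  rcases (pv_mem_ones m seats x).mp hx with ⟨h0, -, -⟩
  simpa using h0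

lemma pv_onesFrom_ge (m : Int) (seats : List Int) (i : Int) (him : m ≤ i) :
    pvOnesFrom m seats i = [] := by
  unfold pvOnesFrom
  refine List.filter_eq_nil_iff.mpr ?_
  intro x hx
  rcases (pv_mem_ones m seats x).mp hx with ⟨-, hxm, -⟩
  simpa using (by omega : ¬ i ≤ x)

lemma pv_filter_ge_skip (l : List Int) (i : Int) (hni : i ∉ l) :
    l.filter (fun x => decide (i ≤ x)) = l.filter (fun x => decide (i + 1 ≤ x)) := by
  refine List.filter_congr ?_
  intro x hx
  have hne : x ≠ i := fun h => hni (h ▸ hx)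
  by_cases h : i ≤ x
  · have h' : i + 1 ≤ x := by omega
    simp [h, h']
  · have h' : ¬ (i + 1 ≤ x) := by omega
    simp [h, h']

lemma pv_filter_ge_of_mem (l : List Int) (hp : l.Pairwise (· < ·)) (i : Int) (hi : i ∈ l) :
    l.filter (fun x => decide (i ≤ x)) = i :: l.filter (fun x => decide (i + 1 ≤ x)) := by
  induction l with
  | nil => cases hi
  | cons a l ih =>
    rcases List.pairwise_cons.mp hp with ⟨ha, hp'⟩
    rcases List.mem_cons.mp hi with rfl | hi'
    · have h2 : ¬ (i + 1 ≤ i) := by omega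
      simp only [List.filter_cons, le_refl, decide_true, if_true, h2, decide_false,
        Bool.false_eq_true, if_false]
      congr 1
      refine List.filter_congr ?_
      intro x hx
      have hlt := ha x hx
      have e1 : i ≤ x := le_of_lt hlt
      have e2 : i + 1 ≤ x := by omega
      simp [e1, e2]
    · have hai : a < i := ha i hi'
      have h1 : ¬ (i ≤ a) := by omega
      have h2 : ¬ (i + 1 ≤ a) := by omega
      simp only [List.filter_cons, h1, h2, decide_false, Bool.false_eq_true, if_false]
      exact ih hp' hi'

lemma pv_filter_ge_tail (l : List Int) (hp : l.Pairwise (· < ·)) (i q : Int) (tl : List Int)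
    (h : l.filter (fun x => decide (i ≤ x)) = q :: tl) :
    tl = l.filter (fun x => decide (q + 1 ≤ x)) := by
  induction l generalizing tl with
  | nil => simp at h
  | cons a l ih =>
    rcases List.pairwise_cons.mp hp with ⟨ha, hp'⟩
    by_cases hia : i ≤ a
    · rw [List.filter_cons] at h
      simp only [hia, decide_true, if_true] at h
      rcases List.cons.injEq .. ▸ h with ⟨rfl, htl⟩
      have hall : l.filter (fun x => decide (i ≤ x)) = l := by
        refine List.filter_eq_self.mpr ?_
        intro x hx
        have := ha x hx
        simpa using (by omega : i ≤ x)
      have h2 : ¬ (a + 1 ≤ a) := by omega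
      rw [List.filter_cons]
      simp only [h2, decide_false, Bool.false_eq_true, if_false]
      have hall' : l.filter (fun x => decide (a + 1 ≤ x)) = l := by
        refine List.filter_eq_self.mpr ?_
        intro x hx
        have := ha x hx
        simpa using (by omega : a + 1 ≤ x)
      rw [hall', ← htl, hall]
    · rw [List.filter_cons] at h
      simp only [hia, decide_false, Bool.false_eq_true, if_false] at h
      have hq : q ∈ l.filter (fun x => decide (i ≤ x)) := by
        rw [h]; exact List.mem_cons_self ..
      have hql : q ∈ l := (List.mem_filter.mp hq).1
      have haq : a < q := ha q hql
      have h2 : ¬ (q + 1 ≤ a) := by omega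
      rw [List.filter_cons]
      simp only [h2, decide_false, Bool.false_eq_true, if_false]
      exact ih hp' _ h

lemma pv_floordiv_nonneg (a : Int) (ha : 0 ≤ a) : 0 ≤ PySem.Int.floordiv a 2 := by
  rw [PySem.Int.floordiv_eq_ediv_of_pos (by norm_num)]
  exact Int.ediv_nonneg ha (by norm_num)

lemma pv_skipZeros (m : Int) (seats : List Int)
    (hbin : ∀ k : Int, 0 ≤ k → k < m →
      PySem.List.pyGet? seats k = some 0 ∨ PySem.List.pyGet? seats k = some 1) :
    ∀ i : Int, 0 ≤ i → i ≤ m →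
      pvSkipEq 0 m seats i = (pvOnesFrom m seats i).headD m := by
  have H : ∀ n : Nat, ∀ i : Int, (m - i).toNat = n → 0 ≤ i → i ≤ m →
      pvSkipEq 0 m seats i = (pvOnesFrom m seats i).headD m := by
    intro n
    induction n using Nat.strong_induction_on with
    | _ n ih =>
      intro i hn h0 him
      rw [pvSkipEq]
      by_cases hc : i < m ∧ PySem.List.pyGet? seats i = some 0
      · rw [dif_pos hc]
        have hrec := ih (m - (i + 1)).toNat (by omega) (i + 1) rfl (by omega) (by omega)
        rw [hrec]
        have hni : i ∉ pvOnes m seats := by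
          rw [pv_mem_ones]
          rintro ⟨-, -, h1⟩
          rw [hc.2] at h1
          exact absurd (Option.some.inj h1) (by norm_num)
        unfold pvOnesFrom
        rw [pv_filter_ge_skip _ i hni]
      · rw [dif_neg hc]
        by_cases him' : i < m
        · have h1 : PySem.List.pyGet? seats i = some 1 := by
            rcases hbin i h0 him' with h | h
            · exact absurd ⟨him', h⟩ hc
            · exact h
          have hmem : i ∈ pvOnes m seats := (pv_mem_ones ..).mpr ⟨h0, him', h1⟩
          unfold pvOnesFrom
          rw [pv_filter_ge_of_mem _ (pv_pairwise_ones m seats) i hmem]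
          rfl
        · have hi : i = m := by omega
          rw [pv_onesFrom_ge m seats i (by omega), hi]
          rfl
  intro i
  exact H (m - i).toNat i rfl

lemma pv_skipOnes (m : Int) (seats : List Int) :
    ∀ i : Int, 0 < i → i ≤ m → PySem.List.pyGet? seats (i - 1) = some 1 →
      i ≤ pvSkipEq 1 m seats i ∧ pvSkipEq 1 m seats i ≤ m ∧ 0 < pvSkipEq 1 m seats i ∧
      PySem.List.pyGet? seats (pvSkipEq 1 m seats i - 1) = some 1 ∧
      pvBfrom m (i - 1) (pvOnesFrom m seats i)
        = pvBfrom m (pvSkipEq 1 m seats i - 1) (pvOnesFrom m seats (pvSkipEq 1 m seats i)) := by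
  have H : ∀ n : Nat, ∀ i : Int, (m - i).toNat = n → 0 < i → i ≤ m →
      PySem.List.pyGet? seats (i - 1) = some 1 →
      i ≤ pvSkipEq 1 m seats i ∧ pvSkipEq 1 m seats i ≤ m ∧ 0 < pvSkipEq 1 m seats i ∧
      PySem.List.pyGet? seats (pvSkipEq 1 m seats i - 1) = some 1 ∧
      pvBfrom m (i - 1) (pvOnesFrom m seats i)
        = pvBfrom m (pvSkipEq 1 m seats i - 1) (pvOnesFrom m seats (pvSkipEq 1 m seats i)) := by
    intro n
    induction n using Nat.strong_induction_on with
    | _ n ih =>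
      intro i hn h0 him h1
      rw [pvSkipEq]
      by_cases hc : i < m ∧ PySem.List.pyGet? seats i = some 1
      · rw [dif_pos hc]
        have h1' : PySem.List.pyGet? seats (i + 1 - 1) = some 1 := by
          have : i + 1 - 1 = i := by ring
          rw [this]; exact hc.2
        have hrec := ih (m - (i + 1)).toNat (by omega) (i + 1) rfl (by omega) (by omega) h1'
        refine ⟨by omega, hrec.2.1, hrec.2.2.1, hrec.2.2.2.1, ?_⟩
        have hmem : i ∈ pvOnes m seats := (pv_mem_ones ..).mpr ⟨by omega, hc.1, hc.2⟩
        have hsplit : pvOnesFrom m seats i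
            = i :: pvOnesFrom m seats (i + 1) := by
          unfold pvOnesFrom
          exact pv_filter_ge_of_mem _ (pv_pairwise_ones m seats) i hmem
        rw [hsplit]
        have hterm : max 0 (PySem.Int.floordiv (i - (i - 1) - 2) 2) = 0 := by
          have e : i - (i - 1) - 2 = -1 := by ring
          rw [e]
          decide
        have : pvBfrom m (i - 1) (i :: pvOnesFrom m seats (i + 1))
            = pvBfrom m (i + 1 - 1) (pvOnesFrom m seats (i + 1)) := by
          show max 0 (PySem.Int.floordiv (i - (i - 1) - 2) 2)
              + pvBfrom m i (pvOnesFrom m seats (i + 1)) = _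
          rw [hterm]
          have e : i + 1 - 1 = i := by ring
          rw [e, zero_add]
        rw [this]
        exact hrec.2.2.2.2
      · rw [dif_neg hc]
        exact ⟨le_refl i, him, h0, h1, rfl⟩
  intro i
  exact H (m - i).toNat i rfl

lemma pv_loopA_exit (m : Int) (seats : List Int) (f : Nat) (i r : Int)
    (h : ¬ i < m) (hf : 1 ≤ f) : pvLoopA m seats f i r = r := by
  cases f with
  | zero => omega
  | succ f => simp [pvLoopA, h]

lemma pv_amain (m : Int) (seats : List Int)
    (hbin : ∀ k : Int, 0 ≤ k → k < m →
      PySem.List.pyGet? seats k = some 0 ∨ PySem.List.pyGet? seats k = some 1) :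
    ∀ fuel : Nat, ∀ i r : Int, 0 < i → i ≤ m →
      PySem.List.pyGet? seats (i - 1) = some 1 → (m - i).toNat + 1 ≤ fuel →
      pvLoopA m seats fuel i r = r + pvBfrom m (i - 1) (pvOnesFrom m seats i) := by
  intro fuel
  induction fuel with
  | zero => intro i r _ _ _ hf; omega
  | succ f ih =>
    intro i r h0 him h1 hf
    by_cases hlt : i < m
    · simp only [pvLoopA, if_pos hlt]
      rw [pv_skipZeros m seats hbin i (by omega) him]
      cases hh : pvOnesFrom m seats i with
      | nil =>
        simp only [List.headD_nil]
        have hcount : m - i ≠ 0 := by omega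
        have hm' : ¬ m < m := lt_irrefl m
        have hj : i ≠ 0 := by omega
        rw [if_pos hcount, if_pos hj]
        have hskip : pvSkipEq 1 m seats m = m := by
          rw [pvSkipEq]
          exact dif_neg (fun hx => absurd hx.1 (lt_irrefl m))
        rw [hskip, pv_loopA_exit m seats f m _ (lt_irrefl m) (by omega)]
        have e1 : m - i - 1 + 1 = m - i := by ring
        have e2 : m - 1 - (i - 1) = m - i := by ring
        rw [if_neg hm', e1]
        simp only [pvBfrom]
        rw [e2]
      | cons q tl =>
        have hqmem : q ∈ pvOnesFrom m seats i := by rw [hh]; exact List.mem_cons_self ..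
        rcases (pv_mem_onesFrom m seats i q).mp hqmem with ⟨hiq, hq0, hqm, hq1⟩
        simp only [List.headD_cons]
        have hr' : (if q - i ≠ 0 then
              r + PySem.Int.floordiv ((if q < m then q - i - 1 else q - i) - 1 + 1) 2
            else r) = r + max 0 (PySem.Int.floordiv (q - (i - 1) - 2) 2) := by
          have e : q - (i - 1) - 2 = q - i - 1 := by ring
          rw [e]
          by_cases hqi : q - i ≠ 0
          · rw [if_pos hqi, if_pos hqm]
            have e2 : q - i - 1 - 1 + 1 = q - i - 1 := by ring
            rw [e2]
            have hnn : 0 ≤ PySem.Int.floordiv (q - i - 1) 2 :=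
              pv_floordiv_nonneg _ (by omega)
            rw [max_eq_right hnn]
          · rw [if_neg hqi]
            have e2 : q - i - 1 = -1 := by omega
            rw [e2]
            have : max (0 : Int) (PySem.Int.floordiv (-1) 2) = 0 := by decide
            rw [this, add_zero]
        have hj : i ≠ 0 := by omega
        rw [if_pos hj]
        have hskipq : pvSkipEq 1 m seats q = pvSkipEq 1 m seats (q + 1) := by
          rw [pvSkipEq]; exact dif_pos ⟨hqm, hq1⟩
        have h1' : PySem.List.pyGet? seats (q + 1 - 1) = some 1 := by
          have e : q + 1 - 1 = q := by ring
          rw [e]; exact hq1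
        obtain ⟨he1, he2, he3, he4, he5⟩ := pv_skipOnes m seats (q + 1) (by omega) (by omega) h1'
        set e := pvSkipEq 1 m seats (q + 1) with hedef
        have htl : tl = pvOnesFrom m seats (q + 1) := by
          unfold pvOnesFrom
          exact pv_filter_ge_tail _ (pv_pairwise_ones m seats) i q tl hh
        have hIH := ih e (r + max 0 (PySem.Int.floordiv (q - (i - 1) - 2) 2))
          he3 he2 he4 (by omega)
        rw [hskipq, hr', hIH, ← he5]
        have eq1 : q + 1 - 1 = q := by ring
        rw [eq1, htl]
        show _ = r + pvBfrom m (i - 1) (q :: pvOnesFrom m seats (q + 1))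
        simp only [pvBfrom]
        ring
    · have hi : i = m := by omega
      rw [pv_loopA_exit m seats (f + 1) i r hlt (by omega)]
      rw [pv_onesFrom_ge m seats i (by omega)]
      simp only [pvBfrom]
      have e : m - 1 - (i - 1) = 0 := by omega
      rw [e]
      have e2 : PySem.Int.floordiv 0 2 = 0 := by decide
      rw [e2, add_zero]


lemma pv_top_nil (m : Int) (seats : List Int)
    (hbin : ∀ k : Int, 0 ≤ k → k < m →
      PySem.List.pyGet? seats k = some 0 ∨ PySem.List.pyGet? seats k = some 1)
    (hm : 0 < m) (hL : pvOnes m seats = []) :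
    pvLoopA m seats (m.toNat + 1) 0 0 = PySem.Int.floordiv (m + 1) 2 := by
  simp only [pvLoopA, if_pos hm]
  rw [pv_skipZeros m seats hbin 0 le_rfl (by omega), pv_onesFrom_zero, hL]
  simp only [List.headD_nil]
  have hcount : m - 0 ≠ 0 := by omega
  have hm' : ¬ m < m := lt_irrefl m
  have hj : ¬ (0 : Int) ≠ 0 := by omega
  rw [if_pos hcount, if_neg hj, if_neg hm']
  have hskip : pvSkipEq 1 m seats m = m := by
    rw [pvSkipEq]
    exact dif_neg (fun hx => absurd hx.1 (lt_irrefl m))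
  rw [hskip, pv_loopA_exit m seats m.toNat m _ (lt_irrefl m) (by omega)]
  have e : m - 0 + 1 = m + 1 := by ring
  rw [e, zero_add]

lemma pv_top_cons (m : Int) (seats : List Int)
    (hbin : ∀ k : Int, 0 ≤ k → k < m →
      PySem.List.pyGet? seats k = some 0 ∨ PySem.List.pyGet? seats k = some 1)
    (hm : 0 < m) (o : Int) (rest : List Int) (hL : pvOnes m seats = o :: rest) :
    pvLoopA m seats (m.toNat + 1) 0 0
      = PySem.Int.floordiv o 2 + pvBfrom m o rest := by
  have homem : o ∈ pvOnes m seats := by rw [hL]; exact List.mem_cons_self ..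
  rcases (pv_mem_ones m seats o).mp homem with ⟨ho0, hom, ho1⟩
  simp only [pvLoopA, if_pos hm]
  rw [pv_skipZeros m seats hbin 0 le_rfl (by omega), pv_onesFrom_zero, hL]
  simp only [List.headD_cons]
  have hj : ¬ (0 : Int) ≠ 0 := by omega
  have hr' : (if o - 0 ≠ 0 then
        0 + PySem.Int.floordiv ((if o < m then o - 0 - 1 else o - 0) + 1) 2
      else (0 : Int)) = PySem.Int.floordiv o 2 := by
    by_cases ho : o - 0 ≠ 0
    · rw [if_pos ho, if_pos hom]
      have e : o - 0 - 1 + 1 = o := by ring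
      rw [e, zero_add]
    · rw [if_neg ho]
      have e : o = 0 := by omega
      rw [e]
      decide
  rw [if_neg hj, hr']
  have hskipo : pvSkipEq 1 m seats o = pvSkipEq 1 m seats (o + 1) := by
    rw [pvSkipEq]; exact dif_pos ⟨hom, ho1⟩
  have h1' : PySem.List.pyGet? seats (o + 1 - 1) = some 1 := by
    have e : o + 1 - 1 = o := by ring
    rw [e]; exact ho1
  obtain ⟨he1, he2, he3, he4, he5⟩ := pv_skipOnes m seats (o + 1) (by omega) (by omega) h1'
  have hrest : rest = pvOnesFrom m seats (o + 1) := by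
    unfold pvOnesFrom
    refine pv_filter_ge_tail _ (pv_pairwise_ones m seats) 0 o rest ?_
    rw [← pv_onesFrom_zero m seats] at hL
    exact hL
  rw [hskipo, pv_amain m seats hbin m.toNat _ _ he3 he2 he4 (by omega), ← he5]
  have e : o + 1 - 1 = o := by ring
  rw [e, ← hrest]

lemma pv_bzip (m : Int) : ∀ (l : List Int) (p acc : Int),
    (List.zip (p :: l) l).foldl
        (fun acc pq => acc + max 0 (PySem.Int.floordiv (pq.2 - pq.1 - 2) 2))
        (acc + PySem.Int.floordiv (m - 1 - (p :: l).getLast (by simp)) 2)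
      = acc + pvBfrom m p l := by
  intro l
  induction l with
  | nil =>
    intro p acc
    simp [pvBfrom]
  | cons q tl ih =>
    intro p acc
    have hlast : (p :: q :: tl).getLast (by simp) = (q :: tl).getLast (by simp) :=
      List.getLast_cons (by simp)
    have hzip : List.zip (p :: q :: tl) (q :: tl) = (p, q) :: List.zip (q :: tl) tl := rfl
    rw [hlast, hzip, List.foldl_cons]
    have hcomm : acc + PySem.Int.floordiv (m - 1 - (q :: tl).getLast (by simp)) 2
          + max 0 (PySem.Int.floordiv (q - p - 2) 2)
        = (acc + max 0 (PySem.Int.floordiv (q - p - 2) 2))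
          + PySem.Int.floordiv (m - 1 - (q :: tl).getLast (by simp)) 2 := by ring
    rw [hcomm, ih q (acc + max 0 (PySem.Int.floordiv (q - p - 2) 2))]
    show _ = acc + (max 0 (PySem.Int.floordiv (q - p - 2) 2) + pvBfrom m q tl)
    ring

-- ===== VERDICT (by name: the statement is the Claim_ definition above) =====
theorem is_possible_to_get_seats_spec : Claim_equal_is_possible_to_get_seats := by
  intro n m seats _ hpre
  rcases hpre with ⟨hlen, hb⟩
  have hbin := pv_bin m seats hlen hb
  unfold Spec_is_possible_to_get_seats
  unfold is_possible_to_get_seats is_possible_to_get_seats_alt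
  have hones : ((PySem.List.pyRange 0 m 1).filter
      (fun i => decide (PySem.List.pyGet? seats i = some 1))) = pvOnes m seats := rfl
  rw [hones]
  by_cases hm : m ≤ 0
  · rw [if_pos hm]
    have ht : m.toNat = 0 := by omega
    rw [ht]
    have : pvLoopA m seats (0 + 1) 0 0 = 0 := by
      simp only [pvLoopA]
      rw [if_neg (by omega : ¬ (0 : Int) < m)]
    rw [this]
  · rw [if_neg hm]
    cases hL : pvOnes m seats with
    | nil =>
      rw [pv_top_nil m seats hbin (by omega) hL]
    | cons o rest =>
      rw [pv_top_cons m seats hbin (by omega) o rest hL]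
      rw [← pv_bzip m rest o (PySem.Int.floordiv o 2)]
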